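-- pv_equiv track=rewrite | github.com/RickCYD/Deck_synergy | src/simulation/mana_simulator.py | _tokenize_mana_cost
-- ===== SOURCE A (Python) =====
-- from typing import Dict, List, Optional, Tuple, Set, Iterable
--
-- def _tokenize_mana_cost(mana_cost: str) -> List[str]:
--     """Extract tokens inside braces from a Scryfall mana cost string.
--
--     Example: "{2}{U}{U}" -> ["2", "U", "U"].
--     Unrecognized tokens are returned as-is for upstream handling.
--     """
--     tokens: List[str] = []
--     buf = []
--     inside = False
--     for ch in mana_cost or "":
--         if ch == "{":
--             inside = True
--             buf = []
--         elif ch == "}":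
--             if inside:
--                 token = "".join(buf).strip().upper()
--                 if token:
--                     tokens.append(token)
--             inside = False
--         else:
--             if inside:
--                 buf.append(ch)
--     return tokens
-- ===== SOURCE B (Python) =====
-- from typing import List
--
--
-- def _tokenize_mana_cost(mana_cost: str) -> List[str]:
--     """Slice-extraction scanner: on each '{', scan ahead to the next brace and
--     cut the token out as a slice — no buffer list, no inside flag."""
--     tokens: List[str] = []
--     rest = mana_cost or ""
--     while rest:
--         ch, rest = rest[0], rest[1:]
--         if ch == "{":
--             k = 0
--             while k < len(rest) and rest[k] != "{" and rest[k] != "}":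
--                 k += 1
--             if k < len(rest) and rest[k] == "}":
--                 token = rest[:k].strip().upper()
--                 if token:
--                     tokens.append(token)
--                 rest = rest[k + 1:]
--             else:
--                 rest = rest[k:]
--     return tokens
-- ===== Notes on version B (the rewrite author's own statement) =====
-- stated objective: alternative
-- what changed: Replaced the char-by-char state machine (inside flag + character buffer) by a scanner that, at each opening brace, scans ahead to the next brace and extracts the token as a single slice, continuing after it.
import Mathlib
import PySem

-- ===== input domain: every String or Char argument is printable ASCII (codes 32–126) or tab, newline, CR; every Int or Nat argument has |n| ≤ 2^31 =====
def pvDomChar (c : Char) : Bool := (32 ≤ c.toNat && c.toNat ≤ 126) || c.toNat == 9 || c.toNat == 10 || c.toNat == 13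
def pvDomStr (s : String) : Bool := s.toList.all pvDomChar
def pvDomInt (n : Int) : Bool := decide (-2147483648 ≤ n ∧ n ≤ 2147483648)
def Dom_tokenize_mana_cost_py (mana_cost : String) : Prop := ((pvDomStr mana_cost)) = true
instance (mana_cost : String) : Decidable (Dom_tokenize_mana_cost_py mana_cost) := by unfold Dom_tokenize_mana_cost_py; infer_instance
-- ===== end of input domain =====

-- B replaces A's char-by-char state machine (inside flag + buffer list) by a scanner that,
-- at each '{', finds the next brace and cuts the token out as one slice (objective: alternative).

-- ===== PORT A =====
-- state: (tokens, buf, inside)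
def tokAStep (st : List String × List Char × Bool) (ch : Char) :
    List String × List Char × Bool :=
  if ch = '{' then (st.1, [], true)
  else if ch = '}' then
    if st.2.2 then
      let token := PySem.Chars.upper (PySem.Chars.strip st.2.1)
      ((if token ≠ [] then st.1 ++ [String.ofList token] else st.1), st.2.1, false)
    else (st.1, st.2.1, false)
  else
    if st.2.2 then (st.1, st.2.1 ++ [ch], true) else st

def tokenize_mana_cost_py (mana_cost : String) : List String :=
  (mana_cost.toList.foldl tokAStep ([], [], false)).1

-- ===== PORT B =====
-- not a brace?
def tokNotBrace (d : Char) : Bool := !(d == '{') && !(d == '}')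

-- token = rest[:k].strip().upper(); appended only if non-empty
def tokEmit (body : List Char) : List String :=
  let token := PySem.Chars.upper (PySem.Chars.strip body)
  if token ≠ [] then [String.ofList token] else []

-- the while loop of Source B: pop the head; on '{' scan to the next brace (takeWhile/dropWhile
-- = the inner `k` scan), emit the slice if it is closed by '}', and continue after it
def tokAltGo : List Char → List String
  | [] => []
  | ch :: rest =>
    if ch = '{' then
      let body := rest.takeWhile tokNotBrace
      let rest2 := rest.dropWhile tokNotBrace
      if rest2.head? = some '}' then tokEmit body ++ tokAltGo rest2.tail
      else tokAltGo rest2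
    else tokAltGo rest
termination_by cs => cs.length
decreasing_by
  · have h1 := List.length_dropWhile_le (p := tokNotBrace) (l := rest)
    have h2 := List.length_tail (l := rest.dropWhile tokNotBrace)
    simp at *; omega
  · have h1 := List.length_dropWhile_le (p := tokNotBrace) (l := rest)
    simp; omega
  · simp

def tokenize_mana_cost_py_alt (mana_cost : String) : List String :=
  tokAltGo mana_cost.toList

-- ===== PRECONDITION & SPEC =====
def Spec_tokenize_mana_cost_py (mana_cost : String) (out : List String) : Prop := out = tokenize_mana_cost_py_alt mana_cost
instance (mana_cost : String) (out : List String) : Decidable (Spec_tokenize_mana_cost_py mana_cost out) := by unfold Spec_tokenize_mana_cost_py; infer_instance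

-- ===== CLAIM (what is proved, stated in full; the proofs are below) =====
def Claim_equal_tokenize_mana_cost_py : Prop := ∀ (mana_cost : String), Dom_tokenize_mana_cost_py mana_cost → Spec_tokenize_mana_cost_py mana_cost (tokenize_mana_cost_py mana_cost)

-- ===== LEMMAS AND PROOFS =====

-- B's value when the scanner is inside a brace group with buffer `b` and `cs` still to read
def tokInside (b : List Char) (cs : List Char) : List String :=
  if (cs.dropWhile tokNotBrace).head? = some '}' then
    tokEmit (b ++ cs.takeWhile tokNotBrace) ++ tokAltGo (cs.dropWhile tokNotBrace).tail
  else tokAltGo (cs.dropWhile tokNotBrace)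

lemma tokAltGo_open (rest : List Char) : tokAltGo ('{' :: rest) = tokInside [] rest := by
  rw [tokAltGo]; simp [tokInside]

lemma tok_main (cs : List Char) :
    (∀ t b, (cs.foldl tokAStep (t, b, false)).1 = t ++ tokAltGo cs) ∧
    (∀ t b, (cs.foldl tokAStep (t, b, true)).1 = t ++ tokInside b cs) := by
  induction cs with
  | nil => simp [tokAltGo, tokInside]
  | cons c cs ih =>
    obtain ⟨ihP, ihQ⟩ := ih
    constructor
    · intro t b
      rw [List.foldl_cons]
      by_cases hc : c = '{'
      · subst hc
        have hs : tokAStep (t, b, false) '{' = (t, [], true) := by simp [tokAStep]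
        rw [hs, ihQ, tokAltGo_open]
      · by_cases hc2 : c = '}'
        · subst hc2
          have hs : tokAStep (t, b, false) '}' = (t, b, false) := by simp [tokAStep]
          rw [hs, ihP, tokAltGo]
          simp
        · have hs : tokAStep (t, b, false) c = (t, b, false) := by simp [tokAStep, hc, hc2]
          rw [hs, ihP, tokAltGo]
          simp [hc]
    · intro t b
      rw [List.foldl_cons]
      by_cases hc : c = '{'
      · subst hc
        have hs : tokAStep (t, b, true) '{' = (t, [], true) := by simp [tokAStep]
        have hr : tokInside b ('{' :: cs) = tokAltGo ('{' :: cs) := by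
          rw [tokInside]; simp [tokNotBrace]
        rw [hs, ihQ, hr, tokAltGo_open]
      · by_cases hc2 : c = '}'
        · subst hc2
          have hs : tokAStep (t, b, true) '}' =
              ((if PySem.Chars.upper (PySem.Chars.strip b) ≠ [] then
                  t ++ [String.ofList (PySem.Chars.upper (PySem.Chars.strip b))] else t),
                b, false) := by simp [tokAStep]
          rw [hs]
          split
          · rw [ihP]
            simp [tokInside, tokNotBrace, tokEmit, *]
          · rw [ihP]
            simp [tokInside, tokNotBrace, tokEmit, *]
        · have hp : tokNotBrace c = true := by simp [tokNotBrace, hc, hc2]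
          have hs : tokAStep (t, b, true) c = (t, b ++ [c], true) := by
            simp [tokAStep, hc, hc2]
          rw [hs, ihQ]
          simp [tokInside, hp]

-- ===== VERDICT (by name: the statement is the Claim_ definition above) =====
theorem tokenize_mana_cost_py_spec : Claim_equal_tokenize_mana_cost_py := by
  intro s _
  unfold Spec_tokenize_mana_cost_py tokenize_mana_cost_py tokenize_mana_cost_py_alt
  simpa using (tok_main s.toList).1 [] []
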